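-- pv_equiv track=rewrite | github.com/mortyc126-debug/SHA | combo_C9_C12_neutral_cube.py | sha256_all_states
-- ===== SOURCE A (Python) =====
-- K = [
--     0x428a2f98, 0x71374491, 0xb5c0fbcf, 0xe9b5dba5,
--     0x3956c25b, 0x59f111f1, 0x923f82a4, 0xab1c5ed5,
--     0xd807aa98, 0x12835b01, 0x243185be, 0x550c7dc3,
--     0x72be5d74, 0x80deb1fe, 0x9bdc06a7, 0xc19bf174,
--     0xe49b69c1, 0xefbe4786,
-- ]
--
-- IV = [
--     0x6a09e667, 0xbb67ae85, 0x3c6ef372, 0xa54ff53a,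
--     0x510e527f, 0x9b05688c, 0x1f83d9ab, 0x5be0cd19,
-- ]
--
-- def rr(x, n):
--     return ((x >> n) | (x << (32 - n))) & 0xFFFFFFFF
--
-- def add32(*args):
--     s = 0
--     for a in args:
--         s = (s + a) & 0xFFFFFFFF
--     return s
--
-- def Ch(e, f, g):
--     return (e & f) ^ ((~e) & g) & 0xFFFFFFFF
--
-- def Maj(a, b, c):
--     return (a & b) ^ (a & c) ^ (b & c)
--
-- def Sigma0(a):
--     return rr(a, 2) ^ rr(a, 13) ^ rr(a, 22)
--
-- def Sigma1(e):
--     return rr(e, 6) ^ rr(e, 11) ^ rr(e, 25)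
--
-- def sha256_all_states(W, n_rounds):
--     """Run SHA-256 for n_rounds, return list of (e, a) after each round."""
--     a, b, c, d, e, f, g, h = IV
--     states = []
--     for i in range(n_rounds):
--         T1 = add32(h, Sigma1(e), Ch(e, f, g), K[i], W[i])
--         T2 = add32(Sigma0(a), Maj(a, b, c))
--         h = g
--         g = f
--         f = e
--         e = add32(d, T1)
--         d = c
--         c = b
--         b = a
--         a = add32(T1, T2)
--         states.append((a, b, c, d, e, f, g, h))
--     return states
-- ===== SOURCE B (Python) =====
-- K = [
--     0x428a2f98, 0x71374491, 0xb5c0fbcf, 0xe9b5dba5,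
--     0x3956c25b, 0x59f111f1, 0x923f82a4, 0xab1c5ed5,
--     0xd807aa98, 0x12835b01, 0x243185be, 0x550c7dc3,
--     0x72be5d74, 0x80deb1fe, 0x9bdc06a7, 0xc19bf174,
--     0xe49b69c1, 0xefbe4786,
-- ]
--
-- IV = [
--     0x6a09e667, 0xbb67ae85, 0x3c6ef372, 0xa54ff53a,
--     0x510e527f, 0x9b05688c, 0x1f83d9ab, 0x5be0cd19,
-- ]
--
-- def rr(x, n):
--     return ((x >> n) | (x << (32 - n))) & 0xFFFFFFFF
--
-- def add32(*args):
--     s = 0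
--     for a in args:
--         s = (s + a) & 0xFFFFFFFF
--     return s
--
-- def Ch(e, f, g):
--     return (e & f) ^ ((~e) & g) & 0xFFFFFFFF
--
-- def Maj(a, b, c):
--     return (a & b) ^ (a & c) ^ (b & c)
--
-- def Sigma0(a):
--     return rr(a, 2) ^ rr(a, 13) ^ rr(a, 22)
--
-- def Sigma1(e):
--     return rr(e, 6) ^ rr(e, 11) ^ rr(e, 25)
--
-- def _round(state, i, W):
--     """One SHA-256 round as a pure function on the 8-tuple state."""
--     a, b, c, d, e, f, g, h = state
--     T1 = add32(h, Sigma1(e), Ch(e, f, g), K[i], W[i])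
--     T2 = add32(Sigma0(a), Maj(a, b, c))
--     return (add32(T1, T2), a, b, c, add32(d, T1), e, f, g)
--
-- def _state_after(W, i):
--     """State after i rounds, by recursion from the IV (recomputed per query)."""
--     if i == 0:
--         return tuple(IV)
--     return _round(_state_after(W, i - 1), i - 1, W)
--
-- def sha256_all_states(W, n_rounds):
--     """Run SHA-256 for n_rounds, return list of states after each round.
--
--     Instead of one mutating loop with an accumulator, express round i's
--     state as a pure recursive function of i and materialise the list by
--     a comprehension over the round indices.
--     """
--     return [_state_after(W, i) for i in range(1, n_rounds + 1)]
-- ===== Notes on version B (the rewrite author's own statement) =====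
-- stated objective: alternative
-- what changed: B replaces A's single mutating loop over eight shuffled registers with a pure recursive function state_after(W,i) (one SHA-256 round as a pure tuple-to-tuple function, recursion from the IV) and builds the output by a comprehension over round indices, recomputing each prefix instead of accumulating.
import Mathlib
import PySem

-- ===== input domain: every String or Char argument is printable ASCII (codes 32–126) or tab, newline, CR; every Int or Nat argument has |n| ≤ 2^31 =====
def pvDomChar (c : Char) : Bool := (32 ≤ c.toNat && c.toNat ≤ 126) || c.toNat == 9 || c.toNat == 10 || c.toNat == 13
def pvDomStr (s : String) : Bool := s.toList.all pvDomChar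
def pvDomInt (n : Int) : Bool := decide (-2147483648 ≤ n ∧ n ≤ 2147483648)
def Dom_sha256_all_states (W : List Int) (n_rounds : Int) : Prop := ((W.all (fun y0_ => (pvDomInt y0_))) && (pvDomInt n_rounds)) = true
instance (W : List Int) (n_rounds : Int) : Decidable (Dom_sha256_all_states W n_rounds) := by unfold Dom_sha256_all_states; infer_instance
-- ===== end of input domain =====

-- B recasts A's mutating register loop as a pure recursive function "state after i rounds"
-- mapped over the round indices (recomputing each prefix); same values, no speed claim.

-- ===== PORT A =====
def pvK : List Int := [0x428a2f98, 0x71374491, 0xb5c0fbcf, 0xe9b5dba5,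
  0x3956c25b, 0x59f111f1, 0x923f82a4, 0xab1c5ed5,
  0xd807aa98, 0x12835b01, 0x243185be, 0x550c7dc3,
  0x72be5d74, 0x80deb1fe, 0x9bdc06a7, 0xc19bf174,
  0xe49b69c1, 0xefbe4786]

-- rr's second argument is always a literal 0 ≤ n < 32 in this program, so a Nat parameter is exact
def pvRr (x : Int) (n : Nat) : Int :=
  PySem.Int.band (PySem.Int.bor (x >>> n) (x <<< (32 - n))) 0xFFFFFFFF

def pvAdd32 (args : List Int) : Int :=
  args.foldl (fun s a => PySem.Int.band (s + a) 0xFFFFFFFF) 0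

def pvCh (e f g : Int) : Int :=
  PySem.Int.bxor (PySem.Int.band e f) (PySem.Int.band (PySem.Int.band (Int.not e) g) 0xFFFFFFFF)

def pvMaj (a b c : Int) : Int :=
  PySem.Int.bxor (PySem.Int.bxor (PySem.Int.band a b) (PySem.Int.band a c)) (PySem.Int.band b c)

def pvSigma0 (a : Int) : Int := PySem.Int.bxor (PySem.Int.bxor (pvRr a 2) (pvRr a 13)) (pvRr a 22)

def pvSigma1 (e : Int) : Int := PySem.Int.bxor (PySem.Int.bxor (pvRr e 6) (pvRr e 11)) (pvRr e 25)

-- the round loop of A: fuel = remaining rounds, i = current index; in-range under Pre_ so getD 0 never fires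
def pvLoopA (W : List Int) : Nat → Nat →
    (Int × Int × Int × Int × Int × Int × Int × Int) →
    List (Int × Int × Int × Int × Int × Int × Int × Int) →
    List (Int × Int × Int × Int × Int × Int × Int × Int)
  | 0, _, _, acc => acc.reverse
  | m + 1, i, (a, b, c, d, e, f, g, h), acc =>
      let T1 := pvAdd32 [h, pvSigma1 e, pvCh e f g, pvK.getD i 0, W.getD i 0]
      let T2 := pvAdd32 [pvSigma0 a, pvMaj a b c]
      let st := (pvAdd32 [T1, T2], a, b, c, pvAdd32 [d, T1], e, f, g)
      pvLoopA W m (i + 1) st (st :: acc)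

def sha256_all_states (W : List Int) (n_rounds : Int) : List (Int × Int × Int × Int × Int × Int × Int × Int) :=
  pvLoopA W n_rounds.toNat 0
    (0x6a09e667, 0xbb67ae85, 0x3c6ef372, 0xa54ff53a, 0x510e527f, 0x9b05688c, 0x1f83d9ab, 0x5be0cd19) []

-- ===== PORT B =====
-- one SHA-256 round as a pure function on the 8-tuple state (Source B's _round)
def pvRound (st : Int × Int × Int × Int × Int × Int × Int × Int) (i : Nat) (W : List Int) :
    Int × Int × Int × Int × Int × Int × Int × Int :=
  match st with
  | (a, b, c, d, e, f, g, h) =>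
      let T1 := pvAdd32 [h, pvSigma1 e, pvCh e f g, pvK.getD i 0, W.getD i 0]
      let T2 := pvAdd32 [pvSigma0 a, pvMaj a b c]
      (pvAdd32 [T1, T2], a, b, c, pvAdd32 [d, T1], e, f, g)

-- state after i rounds, by recursion from the IV (Source B's _state_after)
def pvStateAfter (W : List Int) : Nat → Int × Int × Int × Int × Int × Int × Int × Int
  | 0 => (0x6a09e667, 0xbb67ae85, 0x3c6ef372, 0xa54ff53a, 0x510e527f, 0x9b05688c, 0x1f83d9ab, 0x5be0cd19)
  | i + 1 => pvRound (pvStateAfter W i) i W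

def sha256_all_states_alt (W : List Int) (n_rounds : Int) : List (Int × Int × Int × Int × Int × Int × Int × Int) :=
  (List.range n_rounds.toNat).map (fun k => pvStateAfter W (k + 1))

-- ===== PRECONDITION & SPEC =====
-- Pre_ = exactly the inputs where A returns: round i reads K[i] (18 entries) and W[i], else IndexError
def Pre_sha256_all_states (W : List Int) (n_rounds : Int) : Prop :=
  n_rounds ≤ 18 ∧ n_rounds ≤ (W.length : Int)
instance (W : List Int) (n_rounds : Int) : Decidable (Pre_sha256_all_states W n_rounds) := by
  unfold Pre_sha256_all_states; infer_instance
def pvWitness_sha256_all_states : List Int × Int := ([5, -7, 3], 2)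

def Spec_sha256_all_states (W : List Int) (n_rounds : Int) (out : List (Int × Int × Int × Int × Int × Int × Int × Int)) : Prop := out = sha256_all_states_alt W n_rounds
instance (W : List Int) (n_rounds : Int) (out : List (Int × Int × Int × Int × Int × Int × Int × Int)) : Decidable (Spec_sha256_all_states W n_rounds out) := by
  unfold Spec_sha256_all_states
  -- the 8-fold product exceeds the default instance-search size; assemble DecidableEq stepwise
  haveI i2 : DecidableEq (Int × Int) := inferInstance
  haveI i3 : DecidableEq (Int × Int × Int) := inferInstance
  haveI i4 : DecidableEq (Int × Int × Int × Int) := inferInstance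
  haveI i5 : DecidableEq (Int × Int × Int × Int × Int) := inferInstance
  haveI i6 : DecidableEq (Int × Int × Int × Int × Int × Int) := inferInstance
  haveI i7 : DecidableEq (Int × Int × Int × Int × Int × Int × Int) := inferInstance
  haveI i8 : DecidableEq (Int × Int × Int × Int × Int × Int × Int × Int) := inferInstance
  infer_instance

-- ===== CLAIM (what is proved, stated in full; the proofs are below) =====
def Claim_equal_sha256_all_states : Prop := ∀ (W : List Int) (n_rounds : Int), Dom_sha256_all_states W n_rounds → Pre_sha256_all_states W n_rounds → Spec_sha256_all_states W n_rounds (sha256_all_states W n_rounds)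

-- ===== LEMMAS AND PROOFS =====

theorem pvLoopA_acc (W : List Int) (m i : Nat) (st : Int × Int × Int × Int × Int × Int × Int × Int)
    (acc : List (Int × Int × Int × Int × Int × Int × Int × Int)) :
    pvLoopA W m i st acc = acc.reverse ++ pvLoopA W m i st [] := by
  induction m generalizing i st acc with
  | zero => simp [pvLoopA]
  | succ m ih =>
      obtain ⟨a, b, c, d, e, f, g, h⟩ := st
      rw [pvLoopA, pvLoopA]
      rw [ih _ _ (_ :: acc), ih _ _ [_]]
      simp

theorem pvLoopA_step (W : List Int) (m j : Nat) :
    pvLoopA W m j (pvStateAfter W j) []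
      = (List.range m).map (fun k => pvStateAfter W (j + k + 1)) := by
  induction m generalizing j with
  | zero => simp [pvLoopA]
  | succ m ih =>
      have hstep : pvLoopA W (m + 1) j (pvStateAfter W j) []
          = pvLoopA W m (j + 1) (pvStateAfter W (j + 1)) [pvStateAfter W (j + 1)] := by
        rcases hs : pvStateAfter W j with ⟨a, b, c, d, e, f, g, h⟩
        simp only [pvStateAfter, hs, pvLoopA, pvRound]
      rw [hstep, pvLoopA_acc, ih (j + 1)]
      rw [List.range_succ_eq_map]
      simp [Function.comp, Nat.add_assoc, Nat.add_comm, Nat.add_left_comm]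

-- ===== VERDICT (by name: the statement is the Claim_ definition above) =====
theorem sha256_all_states_spec : Claim_equal_sha256_all_states := by
  intro W n _ _
  unfold Spec_sha256_all_states sha256_all_states sha256_all_states_alt
  have h := pvLoopA_step W n.toNat 0
  simpa using h
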